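-- pv_equiv track=rewrite | github.com/xiongsiheng/SemCom | bin_tree.py | find_first_overlap
-- ===== SOURCE A (Python) =====
-- def find_first_overlap(large_list, small_list):
--     # Length of the smaller list to compare sublists of the same size
--     small_len = len(small_list)
--     # Loop through each sublist in the larger list
--     for sublist in large_list:
--         # Extract the relevant part of the sublist (excluding the last element)
--         relevant_part = sublist[:-1]
--
--         # Check each possible subsequence in the relevant part
--         for i in range(len(relevant_part) - small_len + 1):
--             # Compare the slice of the relevant part with the small list
--             if relevant_part[i:i + small_len] == small_list:
--                 return sublist  # Return the first matching sublist
--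
--     return None  # Return None if no matching sublist is found
-- ===== SOURCE B (Python) =====
-- def find_first_overlap(large_list, small_list):
--     # Rabin-Karp: rolling polynomial hash over each sublist's relevant part;
--     # the window is compared element-wise only on a hash hit.
--     m = len(small_list)
--     B = 1000003
--     P = (1 << 61) - 1
--     target = 0
--     for v in small_list:
--         target = (target * B + v) % P
--     powm = pow(B, m, P)
--     for sublist in large_list:
--         if m == 0:
--             return sublist  # empty pattern matches immediately
--         n = len(sublist) - 1  # match must lie strictly before the last element
--         h = 0
--         for i in range(n):
--             h = (h * B + sublist[i]) % P
--             if i >= m: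
--                 h = (h - sublist[i - m] * powm) % P
--             if i >= m - 1 and h == target and sublist[i - m + 1:i + 1] == small_list:
--                 return sublist
--     return None
-- ===== Notes on version B (the rewrite author's own statement) =====
-- stated objective: alternative
-- what changed: Replaces the naive per-position slice comparison with a Rabin-Karp rolling polynomial hash (mod 2^61-1): each position does an O(1) hash update and the O(m) element comparison runs only on a hash hit, instead of materialising and comparing a fresh window slice at every position; in pure Python the interpreted arithmetic is not measurably faster than A's C-level slicing.
import Mathlib
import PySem

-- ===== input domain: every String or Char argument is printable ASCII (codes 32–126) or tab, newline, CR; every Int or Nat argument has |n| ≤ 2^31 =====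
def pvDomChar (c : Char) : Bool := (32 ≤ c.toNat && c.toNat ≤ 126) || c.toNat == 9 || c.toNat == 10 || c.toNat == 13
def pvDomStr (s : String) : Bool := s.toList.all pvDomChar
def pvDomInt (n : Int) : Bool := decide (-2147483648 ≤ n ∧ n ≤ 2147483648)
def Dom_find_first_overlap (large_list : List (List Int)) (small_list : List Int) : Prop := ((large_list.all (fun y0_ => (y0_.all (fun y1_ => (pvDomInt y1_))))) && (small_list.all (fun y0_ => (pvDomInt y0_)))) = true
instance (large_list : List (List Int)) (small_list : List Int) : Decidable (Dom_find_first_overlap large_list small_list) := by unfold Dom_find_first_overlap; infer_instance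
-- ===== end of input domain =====

-- B replaces A's naive per-position slice comparison by a Rabin-Karp rolling polynomial
-- hash (mod 2^61-1), comparing a window element-wise only on a hash hit (objective:
-- alternative algorithm); same return value everywhere.

-- ===== PORT A =====
-- inner loop of A: for i in range(len(relevant_part) - small_len + 1): if relevant_part[i:i+small_len] == small_list: return sublist
def pvInnerA (relevant_part small_list : List Int) : Bool :=
  (PySem.List.pyRange 0 ((relevant_part.length : Int) - (small_list.length : Int) + 1) 1).any
    (fun i => PySem.List.slice relevant_part (some i) (some (i + (small_list.length : Int))) == small_list)
def find_first_overlap (large_list : List (List Int)) (small_list : List Int) : Option (List Int) :=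
  match large_list with
  | [] => none
  | sublist :: rest =>
      let relevant_part := PySem.List.slice sublist none (some (-1))
      if pvInnerA relevant_part small_list then some sublist
      else find_first_overlap rest small_list

-- ===== PORT B =====
def pvBase : Int := 1000003
def pvP : Int := 2305843009213693951  -- 2^61 - 1
-- one hash-update step: h = (h * B + v) % P
def pvStepH (h v : Int) : Int := PySem.Int.mod (h * pvBase + v) pvP
-- target = fold of pvStepH over small_list, starting from 0 (the first loop of Source B)
def pvHash (xs : List Int) : Int := xs.foldl pvStepH 0
-- inner for-loop of Source B over i in range(n), carrying the rolling hash h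
def pvScanRK (sub small : List Int) (target powm : Int) : List Int → Int → Bool
  | [], _ => false
  | i :: rest, h =>
      let h1 := pvStepH h (PySem.List.pyGetD sub i 0)
      let h2 := if (small.length : Int) ≤ i then
          PySem.Int.mod (h1 - (PySem.List.pyGetD sub (i - (small.length : Int)) 0) * powm) pvP
        else h1
      if ((small.length : Int) - 1 ≤ i) && (h2 == target) &&
          (PySem.List.slice sub (some (i - (small.length : Int) + 1)) (some (i + 1)) == small) then true
      else pvScanRK sub small target powm rest h2
-- outer for-loop of Source B over the sublists
def pvGoRK (small : List Int) (target powm : Int) : List (List Int) → Option (List Int)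
  | [] => none
  | sub :: rest =>
      if small.length = 0 then some sub
      else if pvScanRK sub small target powm
          (PySem.List.pyRange 0 ((sub.length : Int) - 1) 1) 0 then some sub
      else pvGoRK small target powm rest
def find_first_overlap_alt (large_list : List (List Int)) (small_list : List Int) : Option (List Int) :=
  let target := pvHash small_list
  let powm := PySem.Int.mod (pvBase ^ small_list.length) pvP   -- pow(B, m, P)
  pvGoRK small_list target powm large_list

-- ===== PRECONDITION & SPEC =====
def Spec_find_first_overlap (large_list : List (List Int)) (small_list : List Int) (out : Option (List Int)) : Prop := out = find_first_overlap_alt large_list small_list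
instance (large_list : List (List Int)) (small_list : List Int) (out : Option (List Int)) : Decidable (Spec_find_first_overlap large_list small_list out) := by unfold Spec_find_first_overlap; infer_instance

-- ===== CLAIM (what is proved, stated in full; the proofs are below) =====
def Claim_equal_find_first_overlap : Prop := ∀ (large_list : List (List Int)) (small_list : List Int), Dom_find_first_overlap large_list small_list → Spec_find_first_overlap large_list small_list (find_first_overlap large_list small_list)

-- ===== LEMMAS AND PROOFS =====

lemma pvP_pos : (0 : Int) < pvP := by norm_num [pvP]

lemma pvStepH_eq (h v : Int) : pvStepH h v = (h * pvBase + v) % pvP := by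
  rw [pvStepH, PySem.Int.mod_eq_emod_of_pos pvP_pos]

lemma pvHash_bounds : ∀ (xs : List Int) (h : Int), 0 ≤ h → h < pvP →
    0 ≤ xs.foldl pvStepH h ∧ xs.foldl pvStepH h < pvP := by
  intro xs
  induction xs with
  | nil => intro h h0 h1; exact ⟨h0, h1⟩
  | cons v rest ih =>
    intro h _ _
    rw [List.foldl_cons]
    exact ih _ (by rw [pvStepH_eq]; exact Int.emod_nonneg _ (by norm_num [pvP]))
      (by rw [pvStepH_eq]; exact Int.emod_lt_of_pos _ pvP_pos)

lemma pvHash_nonneg (xs : List Int) : 0 ≤ pvHash xs :=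
  (pvHash_bounds xs 0 (le_refl 0) pvP_pos).1

lemma pvHash_lt (xs : List Int) : pvHash xs < pvP :=
  (pvHash_bounds xs 0 (le_refl 0) pvP_pos).2

lemma pvFoldl_shift : ∀ (xs : List Int) (h : Int),
    xs.foldl pvStepH h ≡ h * pvBase ^ xs.length + pvHash xs [ZMOD pvP] := by
  intro xs
  induction xs with
  | nil => intro h; simp [pvHash]
  | cons v rest ih =>
    intro h
    have hmod : ∀ a : Int, (a % pvP) ≡ a [ZMOD pvP] := fun a => Int.emod_emod_of_dvd a dvd_rfl
    have h1 : (v :: rest).foldl pvStepH h = rest.foldl pvStepH (pvStepH h v) := rfl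
    have h2 : pvHash (v :: rest) = rest.foldl pvStepH (pvStepH 0 v) := rfl
    have e1 : rest.foldl pvStepH (pvStepH h v) ≡ (h * pvBase + v) * pvBase ^ rest.length + pvHash rest [ZMOD pvP] := by
      calc rest.foldl pvStepH (pvStepH h v)
          ≡ (pvStepH h v) * pvBase ^ rest.length + pvHash rest [ZMOD pvP] := ih _
        _ ≡ (h * pvBase + v) * pvBase ^ rest.length + pvHash rest [ZMOD pvP] := by
            exact Int.ModEq.add_right _ (Int.ModEq.mul_right _ (by rw [pvStepH_eq]; exact hmod _))
    have e2 : pvHash (v :: rest) ≡ v * pvBase ^ rest.length + pvHash rest [ZMOD pvP] := by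
      rw [h2]
      calc rest.foldl pvStepH (pvStepH 0 v)
          ≡ (pvStepH 0 v) * pvBase ^ rest.length + pvHash rest [ZMOD pvP] := ih _
        _ ≡ v * pvBase ^ rest.length + pvHash rest [ZMOD pvP] := by
            refine Int.ModEq.add_right _ (Int.ModEq.mul_right _ ?_)
            rw [pvStepH_eq]; simpa using hmod v
    rw [h1]
    calc rest.foldl pvStepH (pvStepH h v)
        ≡ (h * pvBase + v) * pvBase ^ rest.length + pvHash rest [ZMOD pvP] := e1
      _ = h * pvBase ^ (v :: rest).length + (v * pvBase ^ rest.length + pvHash rest) := by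
          simp [List.length_cons]; ring
      _ ≡ h * pvBase ^ (v :: rest).length + pvHash (v :: rest) [ZMOD pvP] :=
          Int.ModEq.add_left _ e2.symm

lemma pvHash_cons (a : Int) (xs : List Int) :
    pvHash (a :: xs) ≡ a * pvBase ^ xs.length + pvHash xs [ZMOD pvP] := by
  have hmod : ∀ b : Int, (b % pvP) ≡ b [ZMOD pvP] := fun b => Int.emod_emod_of_dvd b dvd_rfl
  have h2 : pvHash (a :: xs) = xs.foldl pvStepH (pvStepH 0 a) := rfl
  rw [h2]
  calc xs.foldl pvStepH (pvStepH 0 a)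
      ≡ (pvStepH 0 a) * pvBase ^ xs.length + pvHash xs [ZMOD pvP] := pvFoldl_shift _ _
    _ ≡ a * pvBase ^ xs.length + pvHash xs [ZMOD pvP] := by
        refine Int.ModEq.add_right _ (Int.ModEq.mul_right _ ?_)
        rw [pvStepH_eq]; simpa using hmod a

lemma pvTakeDropDropLast (l : List Int) (i m : Nat) (h : i + m ≤ l.length - 1) :
    (l.dropLast.drop i).take m = (l.drop i).take m := by
  rw [List.dropLast_eq_take, List.drop_take, List.take_take]
  congr 1
  omega

-- A's inner loop returns true iff small_list occurs in sublist strictly before the last element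
lemma pvInnerA_iff (sublist small_list : List Int) (hs : small_list ≠ []) :
    (pvInnerA (PySem.List.slice sublist none (some (-1))) small_list = true ↔
      ∃ i : Nat, (i : Int) + (small_list.length : Int) ≤ (sublist.length : Int) - 1 ∧
        (sublist.drop i).take small_list.length = small_list) := by
  have hm1 : 1 ≤ small_list.length := List.length_pos_iff.mpr hs
  rw [PySem.List.slice_to_neg_one, pvInnerA, List.any_eq_true]
  constructor
  · rintro ⟨x, hxmem, hbeq⟩
    obtain ⟨hx0, hxlt⟩ := PySem.List.mem_pyRange_one.mp hxmem
    obtain ⟨i, rfl⟩ : ∃ i : Nat, x = (i : Int) := ⟨x.toNat, (Int.toNat_of_nonneg hx0).symm⟩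
    rw [List.length_dropLast] at hxlt
    have hb : i + small_list.length ≤ sublist.length - 1 := by omega
    have hb' : (i : Int) + (small_list.length : Int) ≤ (sublist.length : Int) - 1 := by omega
    rw [PySem.List.slice_natCast_add, beq_iff_eq, pvTakeDropDropLast sublist i _ hb] at hbeq
    exact ⟨i, hb', hbeq⟩
  · rintro ⟨i, hb', hmatch⟩
    have hb : i + small_list.length ≤ sublist.length - 1 := by omega
    refine ⟨(i : Int), PySem.List.mem_pyRange_one.mpr ⟨by omega, ?_⟩, ?_⟩
    · rw [List.length_dropLast]; omega
    · rw [PySem.List.slice_natCast_add, beq_iff_eq, pvTakeDropDropLast sublist i _ hb]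
      exact hmatch

lemma pvInnerA_nil (relevant_part : List Int) : pvInnerA relevant_part [] = true := by
  rw [pvInnerA, List.any_eq_true]
  refine ⟨0, PySem.List.mem_pyRange_one.mpr ⟨le_refl _, by simp⟩, ?_⟩
  have h0 : (0 : Int) = ((0 : Nat) : Int) := rfl
  rw [h0, show ((0:Nat):Int) + (([] : List Int).length : Int) = ((0:Nat):Int) + ((0:Nat):Int) by simp,
    PySem.List.slice_natCast_add]
  simp


lemma pvHash_append (xs : List Int) (a : Int) :
    pvHash (xs ++ [a]) = pvStepH (pvHash xs) a := by
  simp [pvHash, List.foldl_append]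

-- one step of the rolling-hash invariant: from the hash of the previous window to the next
lemma pvRoll (sub small : List Int) (i : Nat) (hm1 : 1 ≤ small.length) (hi : i < sub.length) :
    (if (small.length : Int) ≤ (i : Nat) then
        PySem.Int.mod ((pvStepH (pvHash ((sub.take i).drop (i - small.length)))
            (PySem.List.pyGetD sub (i : Nat) 0)) -
          (PySem.List.pyGetD sub ((i : Nat) - (small.length : Int)) 0) *
            (PySem.Int.mod (pvBase ^ small.length) pvP)) pvP
      else pvStepH (pvHash ((sub.take i).drop (i - small.length))) (PySem.List.pyGetD sub (i : Nat) 0))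
    = pvHash ((sub.take (i + 1)).drop (i + 1 - small.length)) := by
  have hgi : PySem.List.pyGetD sub ((i : Nat) : Int) 0 = sub[i] := by
    simp [PySem.List.pyGetD_natCast, List.getElem?_eq_getElem hi]
  have htake : sub.take (i + 1) = sub.take i ++ [sub[i]] := by
    rw [List.take_add_one, List.getElem?_eq_getElem hi]; rfl
  by_cases hmi : small.length ≤ i
  · rw [if_pos (by exact_mod_cast hmi)]
    have him : i - small.length < sub.length := by omega
    have hgim : PySem.List.pyGetD sub ((i : Nat) - (small.length : Int)) 0 = sub[i - small.length] := by
      rw [show ((i : Nat) : Int) - (small.length : Int) = ((i - small.length : Nat) : Int) by omega]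
      simp [PySem.List.pyGetD_natCast, List.getElem?_eq_getElem him]
    have hlen_take : (sub.take i).length = i := by simp; omega
    have hcons : (sub.take i).drop (i - small.length) =
        sub[i - small.length] :: (sub.take i).drop (i - small.length + 1) := by
      rw [List.drop_eq_getElem_cons (by omega : i - small.length < (sub.take i).length)]
      congr 1
      exact List.getElem_take
    have htail : (sub.take i).drop (i - small.length + 1) ++ [sub[i]] =
        (sub.take (i + 1)).drop (i + 1 - small.length) := by
      rw [htake, List.drop_append_of_le_length (by omega)]
      congr 2
      omega
    have hlen_new : ((sub.take (i + 1)).drop (i + 1 - small.length)).length = small.length := by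
      simp; omega
    have hchain : pvStepH (pvHash ((sub.take i).drop (i - small.length))) sub[i] =
        pvHash (sub[i - small.length] :: (sub.take (i + 1)).drop (i + 1 - small.length)) := by
      rw [hcons, ← pvHash_append, ← htail]
      rfl
    rw [hgi, hgim, hchain, PySem.Int.mod_eq_emod_of_pos pvP_pos]
    have hmodeq : ∀ b : Int, (b % pvP) ≡ b [ZMOD pvP] := fun b => Int.emod_emod_of_dvd b dvd_rfl
    have hX : pvHash (sub[i - small.length] :: (sub.take (i + 1)).drop (i + 1 - small.length)) -
        sub[i - small.length] * (PySem.Int.mod (pvBase ^ small.length) pvP) ≡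
        pvHash ((sub.take (i + 1)).drop (i + 1 - small.length)) [ZMOD pvP] := by
      have h1 := pvHash_cons sub[i - small.length] ((sub.take (i + 1)).drop (i + 1 - small.length))
      rw [hlen_new] at h1
      have h2 : sub[i - small.length] * (PySem.Int.mod (pvBase ^ small.length) pvP) ≡
          sub[i - small.length] * pvBase ^ small.length [ZMOD pvP] := by
        refine Int.ModEq.mul_left _ ?_
        rw [PySem.Int.mod_eq_emod_of_pos pvP_pos]
        exact hmodeq _
      calc pvHash (sub[i - small.length] :: (sub.take (i + 1)).drop (i + 1 - small.length)) -
            sub[i - small.length] * (PySem.Int.mod (pvBase ^ small.length) pvP)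
          ≡ (sub[i - small.length] * pvBase ^ small.length +
              pvHash ((sub.take (i + 1)).drop (i + 1 - small.length))) -
            sub[i - small.length] * pvBase ^ small.length [ZMOD pvP] := Int.ModEq.sub h1 h2
        _ = pvHash ((sub.take (i + 1)).drop (i + 1 - small.length)) := by ring
    calc (pvHash (sub[i - small.length] :: (sub.take (i + 1)).drop (i + 1 - small.length)) -
          sub[i - small.length] * (PySem.Int.mod (pvBase ^ small.length) pvP)) % pvP
        = pvHash ((sub.take (i + 1)).drop (i + 1 - small.length)) % pvP := hX
      _ = pvHash ((sub.take (i + 1)).drop (i + 1 - small.length)) :=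
          Int.emod_eq_of_lt (pvHash_nonneg _) (pvHash_lt _)
  · rw [if_neg (by exact_mod_cast hmi)]
    rw [hgi, show i - small.length = 0 by omega, show i + 1 - small.length = 0 by omega,
      List.drop_zero, List.drop_zero, htake, pvHash_append]

-- the rolling-hash invariant + correctness of B's inner scan
lemma pvScanRK_iff (sub small : List Int) (hs : small ≠ []) :
    ∀ (d i : Nat) (h : Int),
    (sub.length : Int) - 1 ≤ (i : Int) + (d : Int) →
    h = pvHash ((sub.take i).drop (i - small.length)) →
    (pvScanRK sub small (pvHash small) (PySem.Int.mod (pvBase ^ small.length) pvP)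
        (PySem.List.pyRange (i : Int) ((sub.length : Int) - 1) 1) h = true ↔
      ∃ j : Nat, i ≤ j ∧ (j : Int) < (sub.length : Int) - 1 ∧
        small.length - 1 ≤ j ∧ (sub.drop (j + 1 - small.length)).take small.length = small) := by
  have hm1 : 1 ≤ small.length := List.length_pos_iff.mpr hs
  intro d
  induction d with
  | zero =>
    intro i h hbound _
    rw [PySem.List.pyRange_one_eq_nil (by omega)]
    simp only [pvScanRK, Bool.false_eq_true, false_iff]
    rintro ⟨j, h1, h2, -, -⟩
    omega
  | succ d ih =>
    intro i h hbound hinv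
    by_cases hlt : (i : Int) < (sub.length : Int) - 1
    · have hi1 : i + 1 < sub.length := by omega
      have hi : i < sub.length := by omega
      rw [PySem.List.pyRange_one_cons hlt, pvScanRK]
      subst hinv
      have hstep := pvRoll sub small i hm1 hi
      -- name the rolled hash
      set h2v := pvHash ((sub.take (i + 1)).drop (i + 1 - small.length)) with hh2
      rw [hstep]
      -- characterise the guard
      have hwin : small.length - 1 ≤ i →
          (sub.take (i + 1)).drop (i + 1 - small.length) =
            (sub.drop (i + 1 - small.length)).take small.length := by
        intro hge
        rw [List.drop_take]
        congr 1
        omega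
      have hslice : small.length - 1 ≤ i →
          PySem.List.slice sub (some ((i : Nat) - (small.length : Int) + 1))
            (some ((i : Nat) + 1)) = (sub.drop (i + 1 - small.length)).take small.length := by
        intro hge
        rw [show ((i : Nat) : Int) - (small.length : Int) + 1 = ((i + 1 - small.length : Nat) : Int) by omega,
          show ((i : Nat) : Int) + 1 = ((i + 1 : Nat) : Int) by omega,
          PySem.List.slice_natCast]
        congr 1
        omega
      have hguard : ((((small.length : Int) - 1 ≤ ((i : Nat) : Int)) &&
            (h2v == pvHash small) &&
            (PySem.List.slice sub (some ((i : Nat) - (small.length : Int) + 1))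
              (some ((i : Nat) + 1)) == small)) = true) ↔
          (small.length - 1 ≤ i ∧ (sub.drop (i + 1 - small.length)).take small.length = small) := by
        constructor
        · rintro hc
          simp only [Bool.and_eq_true, decide_eq_true_eq, beq_iff_eq] at hc
          obtain ⟨⟨hc1, -⟩, hc3⟩ := hc
          have hge : small.length - 1 ≤ i := by omega
          rw [hslice hge] at hc3
          exact ⟨hge, hc3⟩
        · rintro ⟨hge, heq⟩
          simp only [Bool.and_eq_true, decide_eq_true_eq, beq_iff_eq]
          refine ⟨⟨by omega, ?_⟩, by rw [hslice hge]; exact heq⟩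
          rw [hh2, hwin hge, heq]
      by_cases hc : (((small.length : Int) - 1 ≤ ((i : Nat) : Int)) &&
            (h2v == pvHash small) &&
            (PySem.List.slice sub (some ((i : Nat) - (small.length : Int) + 1))
              (some ((i : Nat) + 1)) == small)) = true
      · rw [if_pos hc]
        obtain ⟨hge, heq⟩ := hguard.mp hc
        simp only [true_iff]
        exact ⟨i, le_refl _, hlt, hge, heq⟩
      · rw [if_neg hc]
        have hrec := ih (i + 1) h2v (by push_cast; push_cast at hbound; omega)
          (by rw [hh2])
        rw [show ((i : Nat) : Int) + 1 = ((i + 1 : Nat) : Int) by omega, hrec]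
        constructor
        · rintro ⟨j, hj1, hj2, hj3, hj4⟩
          exact ⟨j, by omega, hj2, hj3, hj4⟩
        · rintro ⟨j, hj1, hj2, hj3, hj4⟩
          rcases Nat.eq_or_lt_of_le hj1 with he | hlt'
          · exfalso
            exact hc (hguard.mpr ⟨by omega, by rw [he]; exact hj4⟩)
          · exact ⟨j, by omega, hj2, hj3, hj4⟩
    · rw [PySem.List.pyRange_one_eq_nil (by omega)]
      simp only [pvScanRK, Bool.false_eq_true, false_iff]
      rintro ⟨j, h1, h2, -, -⟩
      omega

-- per-sublist equality of A's and B's inner tests (nonempty pattern)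
lemma pvInner_eq (sub small : List Int) (hs : small ≠ []) :
    pvInnerA (PySem.List.slice sub none (some (-1))) small =
      pvScanRK sub small (pvHash small) (PySem.Int.mod (pvBase ^ small.length) pvP)
        (PySem.List.pyRange 0 ((sub.length : Int) - 1) 1) 0 := by
  have hm1 : 1 ≤ small.length := List.length_pos_iff.mpr hs
  have h1 := pvInnerA_iff sub small hs
  have h2 := pvScanRK_iff sub small hs sub.length 0 0 (by push_cast; omega)
    (by simp [pvHash])
  rw [Nat.cast_zero] at h2
  have : (pvInnerA (PySem.List.slice sub none (some (-1))) small = true) ↔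
      (pvScanRK sub small (pvHash small) (PySem.Int.mod (pvBase ^ small.length) pvP)
        (PySem.List.pyRange 0 ((sub.length : Int) - 1) 1) 0 = true) := by
    rw [h1, h2]
    constructor
    · rintro ⟨s, hb, hm⟩
      refine ⟨s + small.length - 1, Nat.zero_le _, by omega, by omega, ?_⟩
      have : s + small.length - 1 + 1 - small.length = s := by omega
      rw [this]; exact hm
    · rintro ⟨j, -, hj, hjm, hm⟩
      exact ⟨j + 1 - small.length, by omega, hm⟩
  exact Bool.coe_iff_coe.mp this

lemma pvMain (large_list : List (List Int)) (small_list : List Int) :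
    find_first_overlap large_list small_list = find_first_overlap_alt large_list small_list := by
  by_cases hs : small_list = []
  · subst hs
    simp only [find_first_overlap_alt]
    induction large_list with
    | nil => rfl
    | cons sub rest ih =>
      rw [find_first_overlap, pvInnerA_nil]
      simp [pvGoRK]
  · have hl : ¬ small_list.length = 0 := by simpa using hs
    simp only [find_first_overlap_alt]
    induction large_list with
    | nil => rfl
    | cons sub rest ih =>
      rw [find_first_overlap, pvGoRK, if_neg hl, pvInner_eq sub small_list hs, ih]

-- ===== VERDICT (by name: the statement is the Claim_ definition above) =====
theorem find_first_overlap_spec : Claim_equal_find_first_overlap := by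
  intro large_list small_list _
  unfold Spec_find_first_overlap
  exact pvMain large_list small_list
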